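-- pv_equiv track=rewrite | github.com/mediwind/PS_Algorithm | 백준/Gold/1407. 2로 몇 번 나누어질까/2로 몇 번 나누어질까.py | f
-- ===== SOURCE A (Python) =====
-- def f(x):
--     ret = 0
--     i = 1
--     while x > 0:
--         if x & 1:
--             y = x // 2 + 1
--         else:
--             y = x // 2
--         ret += y * i
--         x -= y
--         i *= 2
--     return ret
-- ===== SOURCE B (Python) =====
-- def f(x):
--     # recursion on the halving recurrence: g(x) = ceil(x/2) + 2*g(x//2), g(x)=0 for x<=0
--     if x <= 0:
--         return 0
--     return x // 2 + x % 2 + 2 * f(x // 2)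
-- ===== Notes on version B (the rewrite author's own statement) =====
-- stated objective: alternative
-- what changed: Replaced the three-accumulator while loop (ret, running weight i, mutated x) with a direct recursion on the halving recurrence g(x) = ceil(x/2) + 2*g(x//2) with base g(x)=0 for x<=0.
import Mathlib
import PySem

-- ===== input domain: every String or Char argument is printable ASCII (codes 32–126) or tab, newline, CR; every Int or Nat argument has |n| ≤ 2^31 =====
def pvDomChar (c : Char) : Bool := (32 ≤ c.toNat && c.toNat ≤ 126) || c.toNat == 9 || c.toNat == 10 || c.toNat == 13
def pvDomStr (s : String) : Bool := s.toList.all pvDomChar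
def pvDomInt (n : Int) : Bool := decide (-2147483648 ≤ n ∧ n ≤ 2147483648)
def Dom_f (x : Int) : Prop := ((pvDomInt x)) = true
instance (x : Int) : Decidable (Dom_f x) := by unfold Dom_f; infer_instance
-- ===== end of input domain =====

-- B replaces A's three-accumulator while loop by a direct recursion on the
-- halving recurrence g(x) = ceil(x/2) + 2*g(x//2), g(x) = 0 for x <= 0 (alternative decomposition).

-- ===== PORT A =====
-- the while loop of A over state (x, ret, i)
def fLoop (x ret i : Int) : Int :=
  if _h : x > 0 then
    let y : Int := if PySem.Int.mod x 2 ≠ 0 then PySem.Int.floordiv x 2 + 1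
                   else PySem.Int.floordiv x 2
    fLoop (x - y) (ret + y * i) (i * 2)
  else ret
termination_by x.toNat
decreasing_by
  have hd : PySem.Int.floordiv x 2 = x / 2 := PySem.Int.floordiv_eq_ediv_of_pos (by omega)
  have hm : PySem.Int.mod x 2 = x % 2 := PySem.Int.mod_eq_emod_of_pos (by omega)
  simp only [hd, hm]
  split_ifs <;> omega

def f (x : Int) : Int := fLoop x 0 1

-- ===== PORT B =====
def f_alt (x : Int) : Int :=
  if _h : x ≤ 0 then 0
  else PySem.Int.floordiv x 2 + PySem.Int.mod x 2
       + 2 * f_alt (PySem.Int.floordiv x 2)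
termination_by x.toNat
decreasing_by
  have hd : PySem.Int.floordiv x 2 = x / 2 := PySem.Int.floordiv_eq_ediv_of_pos (by omega)
  simp only [hd]
  omega

-- ===== PRECONDITION & SPEC =====
def Spec_f (x : Int) (out : Int) : Prop := out = f_alt x
instance (x : Int) (out : Int) : Decidable (Spec_f x out) := by unfold Spec_f; infer_instance

-- ===== CLAIM (what is proved, stated in full; the proofs are below) =====
def Claim_equal_f : Prop := ∀ (x : Int), Dom_f x → Spec_f x (f x)

-- ===== LEMMAS AND PROOFS =====

-- loop invariant: fLoop x ret i computes ret + i * g(x) where g = f_alt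
theorem fLoop_eq (x ret i : Int) : fLoop x ret i = ret + i * f_alt x := by
  have key : x > 0 → ∀ y : Int, y = x / 2 + x % 2 →
      fLoop (x - y) (ret + y * i) (i * 2) = ret + i * f_alt x := by
    intro h y hy
    have hd : PySem.Int.floordiv x 2 = x / 2 := PySem.Int.floordiv_eq_ediv_of_pos (by omega)
    have hm : PySem.Int.mod x 2 = x % 2 := PySem.Int.mod_eq_emod_of_pos (by omega)
    rw [f_alt, dif_neg (by omega : ¬ x ≤ 0), hd, hm]
    have hx2 : x - y = x / 2 := by omega
    rw [hx2, fLoop_eq (x / 2) (ret + y * i) (i * 2), hy]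
    ring
  rw [fLoop]
  split_ifs with h hpar
  · have hd : PySem.Int.floordiv x 2 = x / 2 := PySem.Int.floordiv_eq_ediv_of_pos (by omega)
    have hm : PySem.Int.mod x 2 = x % 2 := PySem.Int.mod_eq_emod_of_pos (by omega)
    exact key h _ (by rw [hd]; omega)
  · have hd : PySem.Int.floordiv x 2 = x / 2 := PySem.Int.floordiv_eq_ediv_of_pos (by omega)
    have hm : PySem.Int.mod x 2 = x % 2 := PySem.Int.mod_eq_emod_of_pos (by omega)
    exact key h _ (by rw [hd]; omega)
  · rw [f_alt, dif_pos (by omega : x ≤ 0)]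
    ring
termination_by x.toNat
decreasing_by
  omega

-- ===== VERDICT (by name: the statement is the Claim_ definition above) =====
theorem f_spec : Claim_equal_f := by
  intro x _
  unfold Spec_f f
  rw [fLoop_eq]
  ring
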